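-- pv_equiv track=rewrite | github.com/Marinasunshine/algorithms-and-data-structures | lab3/task3/src/task3.py | scarecrow_sort
-- ===== SOURCE A (Python) =====
-- def scarecrow_sort(n, k, matr):
--     groups = [[] for i in range(k)]
--     for i in range(n):
--         groups[i % k].append(matr[i])
--     for group in groups:
--         group.sort()
--     sorted_matr = [groups[i % k][i // k] for i in range(n)]
--     return "ДА" if sorted_matr == sorted(matr) else "НЕТ"
-- ===== SOURCE B (Python) =====
-- def scarecrow_sort(n, k, matr):
--     # Sorting each residue class mod k sorts the whole array exactly when,
--     # for every residue r, the class {matr[i] : i % k == r} holds precisely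
--     # the values that the positions congruent to r hold in the globally
--     # sorted array.  Check that by counting (residue, value) pairs with one
--     # balance dictionary instead of sorting and rebuilding the groups.
--     if n != len(matr):
--         return "НЕТ"
--     s = sorted(matr)
--     bal = {}
--     for i in range(n):
--         key = (i % k, matr[i])
--         bal[key] = bal.get(key, 0) + 1
--     for i in range(n):
--         key = (i % k, s[i])
--         bal[key] = bal.get(key, 0) - 1
--     return "ДА" if all(v == 0 for v in bal.values()) else "НЕТ"
-- ===== Notes on version B (the rewrite author's own statement) =====
-- stated objective: alternative
-- what changed: Instead of distributing elements into k bucket lists, sorting every bucket and rebuilding the interleaved array for one big comparison, B sorts the input once and uses a single balance dictionary keyed by (residue, value) (+1 for each original element, -1 for each element of the sorted array at the same residue), answering ДА iff every balance is zero; Pre_ excludes the inputs where A raises (ZeroDivisionError/IndexError for k<=0 or n>len(matr) with n>0).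
-- intended difference: For a negative declared length n with an empty array A accidentally reports ДА (its loops never run); B reports НЕТ because n does not match len(matr), the same answer it gives every other length mismatch. — e.g. on scarecrow_sort(-1, 0, []): A returns "ДА", B returns "НЕТ"
import Mathlib
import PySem

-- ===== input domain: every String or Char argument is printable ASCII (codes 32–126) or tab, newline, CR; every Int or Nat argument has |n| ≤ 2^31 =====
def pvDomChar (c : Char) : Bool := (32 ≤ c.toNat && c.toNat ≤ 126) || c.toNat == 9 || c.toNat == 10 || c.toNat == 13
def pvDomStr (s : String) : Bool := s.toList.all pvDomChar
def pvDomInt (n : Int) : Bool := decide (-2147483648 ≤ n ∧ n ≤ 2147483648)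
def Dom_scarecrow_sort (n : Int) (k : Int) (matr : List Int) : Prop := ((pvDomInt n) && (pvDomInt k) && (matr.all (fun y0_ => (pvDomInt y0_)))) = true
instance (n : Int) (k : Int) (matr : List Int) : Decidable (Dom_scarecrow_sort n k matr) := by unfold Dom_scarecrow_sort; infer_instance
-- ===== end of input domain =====

-- B replaces A's bucket-build / per-bucket-sort / reconstruct-and-compare pipeline by one global
-- sort plus one balance dictionary over (residue, value) pairs (+1 per original element, -1 per
-- sorted element at the same residue); same asymptotic cost, different algorithm.

-- ===== PORT A =====
def scarecrow_sort (n : Int) (k : Int) (matr : List Int) : String :=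
  let groups0 : List (List Int) := (PySem.List.pyRange 0 k 1).map (fun _ => ([] : List Int))
  let groups : List (List Int) := (PySem.List.pyRange 0 n 1).foldl
    (fun gs i => gs.modify (PySem.Int.mod i k).toNat (fun g => g ++ [PySem.List.pyGetD matr i 0])) groups0
  let sortedGroups : List (List Int) := groups.map (fun g => PySem.List.sorted g (fun x => x) false)
  let sorted_matr : List Int := (PySem.List.pyRange 0 n 1).map
    (fun i => PySem.List.pyGetD
        (PySem.List.pyGetD sortedGroups (PySem.Int.mod i k) [])
        (PySem.Int.floordiv i k) 0)
  if sorted_matr = PySem.List.sorted matr (fun x => x) false then "ДА" else "НЕТ"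

-- ===== PORT B =====
def scarecrow_sort_alt (n : Int) (k : Int) (matr : List Int) : String :=
  if n ≠ (matr.length : Int) then "НЕТ"
  else
    let s := PySem.List.sorted matr (fun x => x) false
    let bal1 : PySem.Dict (Int × Int) Int := (PySem.List.pyRange 0 n 1).foldl
      (fun d i => d.insert (PySem.Int.mod i k, PySem.List.pyGetD matr i 0)
        (d.getD (PySem.Int.mod i k, PySem.List.pyGetD matr i 0) 0 + 1)) PySem.Dict.empty
    let bal : PySem.Dict (Int × Int) Int := (PySem.List.pyRange 0 n 1).foldl
      (fun d i => d.insert (PySem.Int.mod i k, PySem.List.pyGetD s i 0)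
        (d.getD (PySem.Int.mod i k, PySem.List.pyGetD s i 0) 0 - 1)) bal1
    if bal.values.all (fun v => v == 0) then "ДА" else "НЕТ"

-- ===== PRECONDITION & SPEC =====
-- A raises outside this: ZeroDivisionError (k = 0 with n > 0), IndexError (k < 0 with n > 0,
-- or n > len(matr)); Pre_ admits exactly the inputs on which A returns normally.
def Pre_scarecrow_sort (n : Int) (k : Int) (matr : List Int) : Prop :=
  n ≤ 0 ∨ (1 ≤ k ∧ n ≤ (matr.length : Int))
instance (n : Int) (k : Int) (matr : List Int) : Decidable (Pre_scarecrow_sort n k matr) := by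
  unfold Pre_scarecrow_sort; infer_instance

def pvWitness_scarecrow_sort : Int × Int × List Int := (3, 2, [3, 1, 2])

-- For a negative declared length n with an empty array A accidentally reports ДА (its loops never
-- run); B reports НЕТ because n does not match len(matr), the same answer it gives every other
-- length mismatch.
def D_scarecrow_sort (n : Int) (k : Int) (matr : List Int) : Prop := n < 0 ∧ matr = []
instance (n : Int) (k : Int) (matr : List Int) : Decidable (D_scarecrow_sort n k matr) := by
  unfold D_scarecrow_sort; infer_instance

def Spec_scarecrow_sort (n : Int) (k : Int) (matr : List Int) (out : String) : Prop :=
  ¬ D_scarecrow_sort n k matr → out = scarecrow_sort_alt n k matr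
instance (n : Int) (k : Int) (matr : List Int) (out : String) : Decidable (Spec_scarecrow_sort n k matr out) := by
  unfold Spec_scarecrow_sort; infer_instance

def pvDiffWitness_scarecrow_sort : Int × Int × List Int := (-1, 0, [])
def pvDiffWitnessOut_scarecrow_sort : String × String := ("ДА", "НЕТ")


-- ===== CLAIM (what is proved, stated in full; the proofs are below) =====
def Claim_unchanged_scarecrow_sort : Prop := ∀ (n : Int) (k : Int) (matr : List Int),
  Dom_scarecrow_sort n k matr → Pre_scarecrow_sort n k matr →
  Spec_scarecrow_sort n k matr (scarecrow_sort n k matr)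

def Claim_changed_scarecrow_sort : Prop :=
  Dom_scarecrow_sort (pvDiffWitness_scarecrow_sort.1) (pvDiffWitness_scarecrow_sort.2.1) (pvDiffWitness_scarecrow_sort.2.2) ∧
  Pre_scarecrow_sort (pvDiffWitness_scarecrow_sort.1) (pvDiffWitness_scarecrow_sort.2.1) (pvDiffWitness_scarecrow_sort.2.2) ∧
  D_scarecrow_sort (pvDiffWitness_scarecrow_sort.1) (pvDiffWitness_scarecrow_sort.2.1) (pvDiffWitness_scarecrow_sort.2.2) ∧
  scarecrow_sort (pvDiffWitness_scarecrow_sort.1) (pvDiffWitness_scarecrow_sort.2.1) (pvDiffWitness_scarecrow_sort.2.2) = pvDiffWitnessOut_scarecrow_sort.1 ∧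
  scarecrow_sort_alt (pvDiffWitness_scarecrow_sort.1) (pvDiffWitness_scarecrow_sort.2.1) (pvDiffWitness_scarecrow_sort.2.2) = pvDiffWitnessOut_scarecrow_sort.2 ∧
  pvDiffWitnessOut_scarecrow_sort.1 ≠ pvDiffWitnessOut_scarecrow_sort.2

def Claim_exact_scarecrow_sort : Prop := ∀ (n : Int) (k : Int) (matr : List Int),
  Dom_scarecrow_sort n k matr → Pre_scarecrow_sort n k matr → D_scarecrow_sort n k matr →
  scarecrow_sort n k matr ≠ scarecrow_sort_alt n k matr

-- ===== LEMMAS AND PROOFS =====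

/-- The buckets A builds: bucket `r` holds, in order, the entries among the first `N`
positions of `matr` whose index is ≡ r (mod K). -/
def pvBuckets (matr : List Int) (K N : Nat) : List (List Int) :=
  (List.range K).map (fun r => ((List.range N).filter (fun i => i % K == r)).map (fun i => matr.getD i 0))

/-- j < ⌈A/K⌉ ↔ K*j < A. -/
lemma pv_lt_ceil {K : Nat} (hK : 0 < K) (A j : Nat) : j < (A + K - 1) / K ↔ K * j < A := by
  rw [Nat.lt_iff_add_one_le, Nat.le_div_iff_mul_le hK]
  have h : (j + 1) * K = K * j + K := by ring
  rw [h]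
  generalize K * j = c
  omega

/-- The indices < M that are ≡ r (mod K), in order, form the progression r, r+K, r+2K, …. -/
lemma pv_filter_mod_eq (M K r : Nat) (hK : 0 < K) (hr : r < K) :
    (List.range M).filter (fun i => i % K == r)
      = (List.range ((M - r + K - 1) / K)).map (fun j => r + K * j) := by
  have hinj : Function.Injective (fun j => r + K * j) := by
    intro a b h
    simp only at h
    exact Nat.eq_of_mul_eq_mul_left hK (by omega)
  apply List.eq_of_perm_of_sorted (le := (· < ·)) (fun a b _ _ h1 h2 => absurd h1 (Nat.lt_asymm h2))
  · exact List.Pairwise.filter _ List.pairwise_lt_range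
  · refine List.pairwise_map.mpr (List.pairwise_lt_range.imp (fun {a b} h => ?_))
    have h2 : K * (a + 1) ≤ K * b := Nat.mul_le_mul_left K h
    have h3 : K * (a + 1) = K * a + K := by ring
    omega
  · refine (List.perm_ext_iff_of_nodup (List.nodup_range.filter _) (List.nodup_range.map hinj)).mpr ?_
    intro x
    simp only [List.mem_filter, List.mem_range, beq_iff_eq, List.mem_map]
    constructor
    · rintro ⟨hxM, hxr⟩
      refine ⟨x / K, ?_, ?_⟩
      · rw [pv_lt_ceil hK]
        have h1 := Nat.mod_add_div x K
        rw [hxr] at h1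
        generalize hE : K * (x / K) = e at *
        omega
      · have h1 := Nat.mod_add_div x K
        rw [hxr] at h1
        exact h1
    · rintro ⟨j, hj, rfl⟩
      rw [pv_lt_ceil hK] at hj
      refine ⟨by omega, ?_⟩
      rw [Nat.add_mul_mod_self_left]
      exact Nat.mod_eq_of_lt hr

/-- A's bucket-filling fold builds exactly the residue-class buckets. -/
lemma pv_fold_buckets (matr : List Int) (K : Nat) (N : Nat) :
    (PySem.List.pyRange 0 (N : Int) 1).foldl
      (fun gs i => gs.modify (PySem.Int.mod i (K : Int)).toNat
        (fun g => g ++ [PySem.List.pyGetD matr i 0]))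
      ((PySem.List.pyRange 0 (K : Int) 1).map (fun _ => ([] : List Int)))
    = pvBuckets matr K N := by
  induction N with
  | zero =>
    rw [show ((0 : Nat) : Int) = 0 by rfl, PySem.List.pyRange_one_eq_nil le_rfl]
    simp [pvBuckets, List.map_const', PySem.List.length_pyRange_one]
  | succ N ih =>
    rw [show ((N + 1 : Nat) : Int) = (N : Int) + 1 by push_cast; ring,
      PySem.List.pyRange_one_succ_right (by positivity), List.foldl_append, ih]
    simp only [List.foldl_cons, List.foldl_nil, PySem.Int.mod_natCast, PySem.List.pyGetD_natCast,
      Int.toNat_natCast]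
    apply List.ext_getElem
    · simp [pvBuckets, List.length_modify]
    · intro t h1 h2
      rw [List.getElem_modify]
      simp only [pvBuckets, List.length_modify, List.length_map, List.length_range] at h1 h2 ⊢
      simp only [List.getElem_map, List.getElem_range, List.range_succ,
        List.filter_append, List.map_append]
      by_cases hmt : N % K = t
      · simp [hmt]
      · simp [hmt]

/-- Core equivalence on A's side: A's reconstructed array equals the sorted array
iff every residue class, sorted, equals the corresponding stride of the sorted array. -/
lemma pv_main_iff (matr : List Int) (K : Nat) (hK : 0 < K) :
    ((List.range matr.length).map
       (fun i => (((pvBuckets matr K matr.length).map (fun g => PySem.List.sorted g (fun x => x) false)).getD (i % K) []).getD (i / K) 0)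
     = PySem.List.sorted matr (fun x => x) false)
    ↔ (∀ r < K,
        PySem.List.sorted ((List.range ((matr.length - r + K - 1) / K)).map (fun j => matr.getD (r + K * j) 0)) (fun x => x) false
        = (List.range ((matr.length - r + K - 1) / K)).map
            (fun j => (PySem.List.sorted matr (fun x => x) false).getD (r + K * j) 0)) := by
  set M := matr.length with hM
  set s := PySem.List.sorted matr (fun x => x) false with hs
  have hsl : s.length = M := PySem.List.length_sorted _ _ _
  have hbucket : ∀ r, r < K → ((List.range M).filter (fun i => i % K == r)).map (fun i => matr.getD i 0)
      = (List.range ((M - r + K - 1) / K)).map (fun j => matr.getD (r + K * j) 0) := by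
    intro r hr
    rw [pv_filter_mod_eq M K r hK hr, List.map_map]
    rfl
  have hgetD : ∀ i, (((pvBuckets matr K M).map (fun g => PySem.List.sorted g (fun x => x) false)).getD (i % K) [])
      = PySem.List.sorted ((List.range ((M - i % K + K - 1) / K)).map (fun j => matr.getD (i % K + K * j) 0)) (fun x => x) false := by
    intro i
    simp only [pvBuckets, List.map_map]
    rw [PySem.List.getD_map_range _ _ _ _ (Nat.mod_lt _ hK)]
    simp only [Function.comp]
    rw [hbucket _ (Nat.mod_lt _ hK)]
  constructor
  · intro h r hr
    apply List.ext_getElem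
    · simp [PySem.List.length_sorted]
    · intro j hj1 hj2
      simp only [List.length_map, List.length_range] at hj2
      have hKj : K * j < M - r := (pv_lt_ceil hK (M - r) j).mp hj2
      have hiM : r + K * j < M := by
        generalize K * j = c at *
        omega
      have hcong := congrArg (fun l => l.getD (r + K * j) 0) h
      simp only at hcong
      rw [PySem.List.getD_map_range _ _ _ _ hiM] at hcong
      rw [hgetD] at hcong
      have hmod : (r + K * j) % K = r := by
        rw [Nat.add_mul_mod_self_left]
        exact Nat.mod_eq_of_lt hr
      have hdiv : (r + K * j) / K = j := by
        rw [Nat.add_mul_div_left _ _ hK, Nat.div_eq_of_lt hr]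
        omega
      rw [hmod, hdiv] at hcong
      rw [List.getElem_map, List.getElem_range]
      rw [← List.getD_eq_getElem _ 0 hj1]
      exact hcong
  · intro h
    apply List.ext_getElem
    · simp [hsl]
    · intro i hi1 hi2
      simp only [List.length_map, List.length_range] at hi1
      rw [List.getElem_map, List.getElem_range]
      rw [hgetD i]
      have hr : i % K < K := Nat.mod_lt _ hK
      rw [h _ hr]
      have hdivlt : i / K < (M - i % K + K - 1) / K := by
        rw [pv_lt_ceil hK]
        have h1 := Nat.mod_add_div i K
        generalize K * (i / K) = c at *
        omega
      rw [PySem.List.getD_map_range _ _ _ _ hdivlt]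
      have hmd : i % K + K * (i / K) = i := Nat.mod_add_div i K
      rw [hmd]
      exact List.getD_eq_getElem _ _ hi2

/-- Folding `d[x] = d.get(x, 0) - 1` over a list subtracts each element's count. -/
lemma pv_getD_foldl_insert_sub_one {κ : Type} [BEq κ] [LawfulBEq κ] [DecidableEq κ]
    (l : List κ) (d : PySem.Dict κ Int) (v : κ) :
    (l.foldl (fun d x => d.insert x (d.getD x 0 - 1)) d).getD v 0
      = d.getD v 0 - (l.count v : Int) := by
  induction l generalizing d with
  | nil => simp
  | cons x t ih =>
    rw [List.foldl_cons, ih, PySem.Dict.getD_insert, List.count_cons]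
    by_cases h : v = x
    · subst h; simp; omega
    · simp [h, Ne.symm h]

/-- The tag list of `xs`: position `i` becomes the pair (i mod K, xs[i]). -/
def pvTags (xs : List Int) (M K : Nat) : List (Int × Int) :=
  (List.range M).map (fun i => (((i % K : Nat) : Int), xs.getD i 0))

/-- Counting a reachable tag counts the value inside its residue class. -/
lemma pv_count_tag (xs : List Int) (M K r : Nat) (v : Int) :
    (pvTags xs M K).count (((r : Nat) : Int), v)
      = (((List.range M).filter (fun i => i % K == r)).map (fun i => xs.getD i 0)).count v := by
  unfold pvTags
  rw [List.count_eq_countP, List.count_eq_countP, List.countP_map, List.countP_map,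
    List.countP_filter]
  apply List.countP_congr
  intro i _
  by_cases h1 : i % K = r <;> by_cases h2 : xs.getD i 0 = v <;>
    simp [Prod.ext_iff, h1, h2] <;> omega

/-- A tag with an unreachable residue never occurs. -/
lemma pv_count_tag_zero (xs : List Int) (M K : Nat) (a v : Int)
    (h : ∀ r : Nat, r < K → (r : Int) ≠ a) (hK : 0 < K) :
    (pvTags xs M K).count (a, v) = 0 := by
  unfold pvTags
  rw [List.count_eq_countP, List.countP_map, List.countP_eq_zero]
  intro i _
  simp only [Function.comp, beq_iff_eq, Prod.mk.injEq, not_and]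
  intro h1
  exact absurd h1 (h _ (Nat.mod_lt _ hK))

/-- The two tag lists are permutations iff every residue class of `matr` is a
permutation of the same residue class of `s`. -/
lemma pv_tags_perm_iff (matr s : List Int) (M K : Nat) (hK : 0 < K) :
    (pvTags matr M K).Perm (pvTags s M K)
    ↔ ∀ r < K,
        (((List.range M).filter (fun i => i % K == r)).map (fun i => matr.getD i 0)).Perm
        (((List.range M).filter (fun i => i % K == r)).map (fun i => s.getD i 0)) := by
  rw [List.perm_iff_count]
  constructor
  · intro h r hr
    rw [List.perm_iff_count]
    intro v
    have := h (((r : Nat) : Int), v)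
    rwa [pv_count_tag, pv_count_tag] at this
  · intro h p
    obtain ⟨a, v⟩ := p
    by_cases ha : ∃ r : Nat, r < K ∧ ((r : Nat) : Int) = a
    · obtain ⟨r, hr, rfl⟩ := ha
      rw [pv_count_tag, pv_count_tag]
      exact List.perm_iff_count.mp (h r hr) v
    · push_neg at ha
      rw [pv_count_tag_zero _ _ _ _ _ ha hK, pv_count_tag_zero _ _ _ _ _ ha hK]

/-- B's balance dictionary is all-zero iff the two tag lists are permutations. -/
lemma pv_bal_iff (tA tB : List (Int × Int)) :
    ((tB.foldl (fun d x => d.insert x (d.getD x 0 - 1))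
        (tA.foldl (fun d x => d.insert x (d.getD x 0 + 1))
          (PySem.Dict.empty : PySem.Dict (Int × Int) Int))).values.all
      (fun v => v == 0)) = true
    ↔ tA.Perm tB := by
  set d1 := tA.foldl (fun d x => d.insert x (d.getD x 0 + 1))
    (PySem.Dict.empty : PySem.Dict (Int × Int) Int) with hd1
  set bal := tB.foldl (fun d x => d.insert x (d.getD x 0 - 1)) d1 with hbal
  have hnd : bal.keys.Nodup := by
    rw [hbal, hd1]
    exact PySem.Dict.nodup_keys_foldl_insert _ _ _
      (PySem.Dict.nodup_keys_foldl_insert _ _ _ PySem.Dict.nodup_keys_empty)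
  have hget : ∀ p, bal.getD p 0 = (tA.count p : Int) - (tB.count p : Int) := by
    intro p
    rw [hbal, pv_getD_foldl_insert_sub_one, hd1, PySem.Dict.getD_foldl_insert_add_one,
      PySem.Dict.getD_empty]
    ring
  have hkeys : bal.keys
      = PySem.Set.update (PySem.Set.update
          (PySem.Dict.empty : PySem.Dict (Int × Int) Int).keys tA) tB := by
    rw [hbal, hd1, PySem.Dict.keys_foldl_insert, PySem.Dict.keys_foldl_insert]
  rw [PySem.Dict.values_eq_map_keys bal hnd 0, List.all_map, List.all_eq_true,
    List.perm_iff_count]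
  constructor
  · intro h p
    by_cases hp : p ∈ bal.keys
    · have h2 := h p hp
      simp only [Function.comp, beq_iff_eq] at h2
      have h3 := hget p
      rw [h2] at h3
      omega
    · rw [hkeys, PySem.Set.mem_update, PySem.Set.mem_update] at hp
      push_neg at hp
      rw [List.count_eq_zero_of_not_mem hp.1.2, List.count_eq_zero_of_not_mem hp.2]
  · intro h p _
    simp only [Function.comp, beq_iff_eq]
    rw [hget, h]
    ring

/-- Each stride of the sorted array is weakly increasing. -/
lemma pv_stride_pairwise (matr : List Int) (K r : Nat) (hK : 0 < K) :
    ((List.range ((matr.length - r + K - 1) / K)).map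
      (fun j => (PySem.List.sorted matr (fun x => x) false).getD (r + K * j) 0)).Pairwise (· ≤ ·) := by
  have hsl : (PySem.List.sorted matr (fun x => x) false).length = matr.length :=
    PySem.List.length_sorted _ _ _
  refine List.pairwise_map.mpr ?_
  refine List.pairwise_lt_range.imp_of_mem (fun {a b} hma hmb hab => ?_)
  rw [List.mem_range] at hma hmb
  have hmul : K * a ≤ K * b := Nat.mul_le_mul_left K (le_of_lt hab)
  have hb2 : K * b < matr.length - r := (pv_lt_ceil hK _ b).mp hmb
  have hia : r + K * a < (PySem.List.sorted matr (fun x => x) false).length := by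
    rw [hsl]; omega
  have hib : r + K * b < (PySem.List.sorted matr (fun x => x) false).length := by
    rw [hsl]; omega
  rw [List.getD_eq_getElem _ _ hia, List.getD_eq_getElem _ _ hib]
  exact PySem.List.sorted_id_getElem_mono matr (by omega) hib

/-- Per residue: the sorted class equals the stride of the sorted array iff the class
is a permutation of that stride. -/
lemma pv_res_iff (matr : List Int) (K r : Nat) (hK : 0 < K) (cls str : List Int)
    (hstr : str = (List.range ((matr.length - r + K - 1) / K)).map
      (fun j => (PySem.List.sorted matr (fun x => x) false).getD (r + K * j) 0)) :
    PySem.List.sorted cls (fun x => x) false = str ↔ cls.Perm str := by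
  constructor
  · intro h
    rw [← h]
    exact (PySem.List.sorted_perm _ _ _).symm
  · intro h
    refine PySem.List.sorted_id_eq_of_perm_of_pairwise _ _ h.symm ?_
    rw [hstr]
    exact pv_stride_pairwise matr K r hK

/-- A residue class, as filtered positions, is the arithmetic-progression stride. -/
lemma pv_class_eq (xs : List Int) (M K r : Nat) (hK : 0 < K) (hr : r < K) :
    ((List.range M).filter (fun i => i % K == r)).map (fun i => xs.getD i 0)
      = (List.range ((M - r + K - 1) / K)).map (fun j => xs.getD (r + K * j) 0) := by
  rw [pv_filter_mod_eq M K r hK hr, List.map_map]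
  rfl

/-- B's +1 counting loop over positions is the counting fold over the tag list. -/
lemma pv_fold_tag_add (xs : List Int) (M K : Nat) (d : PySem.Dict (Int × Int) Int) :
    (List.range M).foldl
      (fun d i => d.insert (((i % K : Nat) : Int), xs.getD i 0)
        (d.getD (((i % K : Nat) : Int), xs.getD i 0) 0 + 1)) d
    = (pvTags xs M K).foldl (fun d x => d.insert x (d.getD x 0 + 1)) d := by
  unfold pvTags
  rw [List.foldl_map]

/-- B's -1 counting loop over positions is the discounting fold over the tag list. -/
lemma pv_fold_tag_sub (xs : List Int) (M K : Nat) (d : PySem.Dict (Int × Int) Int) :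
    (List.range M).foldl
      (fun d i => d.insert (((i % K : Nat) : Int), xs.getD i 0)
        (d.getD (((i % K : Nat) : Int), xs.getD i 0) 0 - 1)) d
    = (pvTags xs M K).foldl (fun d x => d.insert x (d.getD x 0 - 1)) d := by
  unfold pvTags
  rw [List.foldl_map]

-- ===== VERDICT (by name: the statement is the Claim_ definition above) =====
theorem scarecrow_sort_spec : Claim_unchanged_scarecrow_sort := by
  intro n k matr _dom pre hnD
  by_cases hn : n ≤ 0
  · by_cases hm : matr = []
    · have hn0 : n = 0 := by
        rcases lt_or_ge n 0 with h | h
        · exact absurd ⟨h, hm⟩ hnD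
        · omega
      subst hm
      subst hn0
      have hA : scarecrow_sort 0 k [] = "ДА" := by
        simp only [scarecrow_sort]
        rw [PySem.List.pyRange_one_eq_nil (le_refl (0 : Int))]
        simp only [List.foldl_nil, List.map_nil]
        rw [if_pos (show ([] : List Int)
          = PySem.List.sorted ([] : List Int) (fun x => x) false by rfl)]
      have hB : scarecrow_sort_alt 0 k [] = "ДА" := by
        simp only [scarecrow_sort_alt]
        rw [if_neg (by simp)]
        rw [PySem.List.pyRange_one_eq_nil (le_refl (0 : Int))]
        simp only [List.foldl_nil]
        rfl
      rw [hA, hB]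
    · simp only [scarecrow_sort, scarecrow_sort_alt]
      rw [PySem.List.pyRange_one_eq_nil hn]
      simp only [List.foldl_nil, List.map_nil]
      have hlen : 0 < matr.length := List.length_pos_of_ne_nil hm
      rw [if_neg (fun heq => by
        have h0 := congrArg List.length heq
        simp [PySem.List.length_sorted] at h0
        omega)]
      rw [if_pos (by omega)]
  · push_neg at hn
    have hk : 1 ≤ k := by
      rcases pre with h | ⟨h1, _⟩
      · omega
      · exact h1
    have hnm : n ≤ (matr.length : Int) := by
      rcases pre with h | ⟨_, h2⟩
      · omega
      · exact h2
    by_cases hlt : n < (matr.length : Int)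
    · simp only [scarecrow_sort, scarecrow_sort_alt]
      rw [if_neg (fun heq => by
        have := congrArg List.length heq
        simp [PySem.List.length_sorted, PySem.List.length_pyRange_one] at this
        omega)]
      rw [if_pos (by omega)]
    · -- main case: n = len(matr), k ≥ 1
      have hEq : n = (matr.length : Int) := le_antisymm hnm (not_lt.mp hlt)
      set K := k.toNat with hKdef
      have hkK : k = (K : Int) := by omega
      have hK : 0 < K := by omega
      simp only [scarecrow_sort, scarecrow_sort_alt]
      rw [hEq, hkK]
      rw [pv_fold_buckets matr K matr.length]
      rw [if_neg (show ¬((matr.length : Int) ≠ (matr.length : Int)) by simp)]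
      rw [PySem.List.pyRange_zero_natCast, List.map_map]
      rw [List.foldl_map, List.foldl_map]
      simp only [Function.comp_def, PySem.Int.mod_natCast, PySem.Int.floordiv_natCast,
        PySem.List.pyGetD_natCast]
      rw [pv_fold_tag_add matr matr.length K,
        pv_fold_tag_sub (PySem.List.sorted matr (fun x => x) false) matr.length K]
      have hiff := pv_bal_iff (pvTags matr matr.length K)
        (pvTags (PySem.List.sorted matr (fun x => x) false) matr.length K)
      rw [pv_tags_perm_iff matr (PySem.List.sorted matr (fun x => x) false)
        matr.length K hK] at hiff
      have hA := pv_main_iff matr K hK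
      by_cases hcond : ∀ r < K,
          PySem.List.sorted ((List.range ((matr.length - r + K - 1) / K)).map
            (fun j => matr.getD (r + K * j) 0)) (fun x => x) false
          = (List.range ((matr.length - r + K - 1) / K)).map
              (fun j => (PySem.List.sorted matr (fun x => x) false).getD (r + K * j) 0)
      · rw [if_pos (hA.mpr hcond), if_pos ?_]
        rw [hiff]
        intro r hr
        rw [pv_class_eq matr matr.length K r hK hr,
          pv_class_eq (PySem.List.sorted matr (fun x => x) false) matr.length K r hK hr]
        exact (pv_res_iff matr K r hK _ _ rfl).mp (hcond r hr)
      · rw [if_neg (fun hAc => hcond (hA.mp hAc)), if_neg ?_]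
        intro hall
        apply hcond
        intro r hr
        have hp := hiff.mp hall r hr
        rw [pv_class_eq matr matr.length K r hK hr,
          pv_class_eq (PySem.List.sorted matr (fun x => x) false) matr.length K r hK hr] at hp
        exact (pv_res_iff matr K r hK _ _ rfl).mpr hp

theorem scarecrow_sort_changed : Claim_changed_scarecrow_sort := by
  unfold Claim_changed_scarecrow_sort; decide

theorem scarecrow_sort_tight : Claim_exact_scarecrow_sort := by
  intro n k matr _ _ hD
  obtain ⟨hn, hm⟩ := (hD : n < 0 ∧ matr = [])
  subst hm
  have hA : scarecrow_sort n k [] = "ДА" := by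
    simp only [scarecrow_sort]
    rw [PySem.List.pyRange_one_eq_nil (le_of_lt hn)]
    simp only [List.foldl_nil, List.map_nil]
    rw [if_pos (show ([] : List Int)
      = PySem.List.sorted ([] : List Int) (fun x => x) false by rfl)]
  have hB : scarecrow_sort_alt n k [] = "НЕТ" := by
    simp only [scarecrow_sort_alt]
    rw [if_pos (by simp; omega)]
  rw [hA, hB]
  decide
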